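-- pv_equiv track=rewrite | github.com/DCDsqd/HACK-cloudcom_game_chat_bot | src/customization.py | get_reply_keyboard
-- ===== SOURCE A (Python) =====
-- def get_reply_keyboard(list_of_all) -> list:
--     reply_keyboard = []
--     for index in range(1, len(list_of_all)):
--         if index % 2 == 1:
--             reply_keyboard.append([str(list_of_all[index - 1][1]), str(list_of_all[index][1])])
--     if len(list_of_all) % 2 == 1:
--         reply_keyboard.append([str(list_of_all[len(list_of_all) - 1][1])])
--     reply_keyboard.append(["Подтвердить"])
--     return reply_keyboard
-- ===== SOURCE B (Python) =====
-- def get_reply_keyboard(list_of_all) -> list: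
--     vals = [str(x[1]) for x in list_of_all]
--     reply_keyboard = [vals[i:i + 2] for i in range(0, len(vals), 2)]
--     reply_keyboard.append(["Подтвердить"])
--     return reply_keyboard
-- ===== Notes on version B (the rewrite author's own statement) =====
-- stated objective: simpler
-- what changed: Replaces the parity-gated index loop plus a separate odd-tail branch with a flat map of each element's [1] followed by slice-chunking into rows of two; the slice absorbs the odd trailing element so no parity branch remains.
import Mathlib
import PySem

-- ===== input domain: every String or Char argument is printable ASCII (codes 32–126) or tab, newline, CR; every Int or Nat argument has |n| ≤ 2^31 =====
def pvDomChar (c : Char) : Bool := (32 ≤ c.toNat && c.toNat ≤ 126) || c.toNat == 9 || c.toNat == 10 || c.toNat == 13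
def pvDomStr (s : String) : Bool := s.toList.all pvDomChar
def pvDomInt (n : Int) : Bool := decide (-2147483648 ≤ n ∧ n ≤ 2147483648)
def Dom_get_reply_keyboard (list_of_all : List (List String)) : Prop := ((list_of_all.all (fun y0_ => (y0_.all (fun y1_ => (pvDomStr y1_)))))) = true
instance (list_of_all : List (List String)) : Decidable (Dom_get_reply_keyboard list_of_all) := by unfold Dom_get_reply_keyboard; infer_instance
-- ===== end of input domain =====

-- B replaces A's parity-gated index loop plus separate odd-tail branch with a flat map of each
-- element's [1] followed by slice-chunking into rows of two; objective: simpler.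


-- ===== PORT A =====
def get_reply_keyboard (list_of_all : List (List String)) : List (List String) :=
  let reply_keyboard : List (List String) :=
    (PySem.List.pyRange 1 (list_of_all.length : Int) 1).foldl
      (fun acc index =>
        if PySem.Int.mod index 2 == 1 then
          acc ++ [[PySem.List.pyGetD (PySem.List.pyGetD list_of_all (index - 1) []) 1 "",
                   PySem.List.pyGetD (PySem.List.pyGetD list_of_all index []) 1 ""]]
        else acc) []
  let reply_keyboard :=
    if PySem.Int.mod (list_of_all.length : Int) 2 == 1 then
      reply_keyboard ++
        [[PySem.List.pyGetD (PySem.List.pyGetD list_of_all ((list_of_all.length : Int) - 1) []) 1 ""]]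
    else reply_keyboard
  reply_keyboard ++ [["Подтвердить"]]

-- ===== PORT B =====
def get_reply_keyboard_alt (list_of_all : List (List String)) : List (List String) :=
  let vals := list_of_all.map (fun x => PySem.List.pyGetD x 1 "")
  let reply_keyboard := (PySem.List.pyRange 0 (vals.length : Int) 2).map
      (fun i => PySem.List.slice vals (some i) (some (i + 2)))
  reply_keyboard ++ [["Подтвердить"]]

-- ===== PRECONDITION & SPEC =====
-- Pre_ excludes exactly the inputs on which Python A raises IndexError: some inner list has
-- fewer than 2 elements (every element's [1] is accessed); B raises IndexError there too.
def Pre_get_reply_keyboard (list_of_all : List (List String)) : Prop :=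
  ∀ x ∈ list_of_all, 2 ≤ x.length
instance (list_of_all : List (List String)) : Decidable (Pre_get_reply_keyboard list_of_all) := by unfold Pre_get_reply_keyboard; infer_instance
def pvWitness_get_reply_keyboard : List (List String) := [["a", "b"], ["c", "d"], ["e", "f"]]

def Spec_get_reply_keyboard (list_of_all : List (List String)) (out : List (List String)) : Prop := out = get_reply_keyboard_alt list_of_all
instance (list_of_all : List (List String)) (out : List (List String)) : Decidable (Spec_get_reply_keyboard list_of_all out) := by unfold Spec_get_reply_keyboard; infer_instance

-- ===== CLAIM (what is proved, stated in full; the proofs are below) =====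
def Claim_equal_get_reply_keyboard : Prop := ∀ (list_of_all : List (List String)), Dom_get_reply_keyboard list_of_all → Pre_get_reply_keyboard list_of_all → Spec_get_reply_keyboard list_of_all (get_reply_keyboard list_of_all)

-- ===== LEMMAS AND PROOFS =====

-- The odd indices of range(1, n) are 1, 3, …, i.e. 2j+1 for j < n/2.
theorem odd_filter (n : Nat) :
    (PySem.List.pyRange 1 (n : Int) 1).filter (fun i => PySem.Int.mod i 2 == 1)
      = (List.range (n/2)).map (fun j => ((2*j+1 : Nat) : Int)) := by
  induction n with
  | zero => simp [PySem.List.pyRange_one_eq_nil]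
  | succ m ih =>
    rcases Nat.eq_zero_or_pos m with hm | hm
    · subst hm; simp [PySem.List.pyRange_one_eq_nil]
    · rw [show ((m+1 : Nat) : Int) = (m : Int) + 1 by push_cast; ring,
        PySem.List.pyRange_one_succ_right (by omega), List.filter_append, ih]
      by_cases h : m % 2 = 1
      · have h1 : (m:Int) % 2 = 1 := by omega
        have h2 : (m+1)/2 = m/2 + 1 := by omega
        rw [h2, List.range_succ, List.map_append]
        simp [h1]
        omega
      · have h1 : (m:Int) % 2 = 0 := by omega
        have h2 : (m+1)/2 = m/2 := by omega
        rw [h2]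
        simp [h1]

-- a 2-element slice strictly inside the list
theorem take_two_drop {α : Type} (v : List α) (i : Nat) (h : i + 1 < v.length) :
    (v.drop i).take 2 = [v[i], v[i+1]] := by
  rw [List.drop_eq_getElem_cons (l := v) (by omega : i < v.length)]
  rw [List.drop_eq_getElem_cons (l := v) (by omega : i + 1 < v.length)]
  rfl

-- a 2-element slice starting at the last position
theorem take_two_drop_last {α : Type} (v : List α) (i : Nat) (h : i + 1 = v.length) :
    (v.drop i).take 2 = [v[i]'(by omega)] := by
  rw [List.drop_eq_getElem_cons (l := v) (by omega : i < v.length)]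
  rw [List.drop_eq_nil_of_le (by omega)]
  rfl

-- B's rows as a map over List.range
theorem rowsB (v : List String) :
    (PySem.List.pyRange 0 (v.length : Int) 2).map
        (fun i => PySem.List.slice v (some i) (some (i + 2)))
      = (List.range ((v.length + 1)/2)).map (fun k => (v.drop (2*k)).take 2) := by
  rw [PySem.List.pyRange_of_pos 0 (v.length : Int) (by norm_num)]
  have hc : (if (0:Int) < (v.length : Int) then (((v.length : Int) - 0 + 2 - 1)/2).toNat else 0)
      = (v.length + 1)/2 := by split_ifs <;> omega
  rw [hc, List.map_map]
  apply List.map_congr_left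
  intro k _
  have h0 : (0 : Int) + 2 * (k : Int) = ((2*k : Nat) : Int) := by push_cast; ring
  simp only [Function.comp, h0]
  rw [show ((2*k : Nat) : Int) + 2 = ((2*k : Nat) : Int) + ((2 : Nat) : Int) by norm_num]
  rw [PySem.List.slice_natCast_add]

-- one pair appended by A's loop = the corresponding 2-element chunk of B's vals
theorem rowsA_elem (l : List (List String)) (j : Nat) (hj : 2*j+1 < l.length) :
    [PySem.List.pyGetD (PySem.List.pyGetD l (((2*j+1 : Nat) : Int) - 1) []) 1 "",
     PySem.List.pyGetD (PySem.List.pyGetD l ((2*j+1 : Nat) : Int) []) 1 ""]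
    = ((l.map (fun x => PySem.List.pyGetD x 1 "")).drop (2*j)).take 2 := by
  have h1 : ((2*j+1 : Nat) : Int) - 1 = ((2*j : Nat) : Int) := by push_cast; ring
  rw [h1, PySem.List.pyGetD_natCast, PySem.List.pyGetD_natCast]
  rw [take_two_drop _ _ (by simpa using hj)]
  rw [List.getD_eq_getElem _ _ (by omega), List.getD_eq_getElem _ _ (by omega)]
  simp

theorem get_reply_keyboard_eq (l : List (List String)) :
    get_reply_keyboard l = get_reply_keyboard_alt l := by
  simp only [get_reply_keyboard, get_reply_keyboard_alt]
  rw [rowsB]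
  simp only [List.length_map]
  rw [PySem.List.foldl_append_if (fun i => PySem.Int.mod i 2 == 1)
      (fun index => [PySem.List.pyGetD (PySem.List.pyGetD l (index - 1) []) 1 "",
                   PySem.List.pyGetD (PySem.List.pyGetD l index []) 1 ""]) _ []]
  rw [odd_filter l.length, List.map_map, List.nil_append]
  rw [show (2:Int) = ((2:Nat):Int) by norm_num, PySem.Int.mod_natCast]
  by_cases h : l.length % 2 = 1
  · have h2 : (l.length + 1)/2 = l.length/2 + 1 := by omega
    rw [h2, List.range_succ, List.map_append]
    have hcond : (((l.length % 2 : Nat) : Int) == 1) = true := by simp [h]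
    rw [hcond, if_pos rfl]
    simp only [List.map_cons, List.map_nil]
    congr 1
    · congr 1
      · apply List.map_congr_left
        intro j hj
        simp only [List.mem_range] at hj
        exact rowsA_elem l j (by omega)
      · -- the odd tail
        rw [take_two_drop_last _ _ (by simp; omega)]
        have h3 : ((l.length : Nat) : Int) - 1 = ((l.length - 1 : Nat) : Int) := by
          push_cast [Nat.cast_sub (by omega : 1 ≤ l.length)]; ring
        rw [h3, PySem.List.pyGetD_natCast, List.getD_eq_getElem _ _ (by omega)]
        have h4 : 2 * (l.length / 2) = l.length - 1 := by omega
        simp [h4]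
  · have h2 : (l.length + 1)/2 = l.length/2 := by omega
    rw [h2]
    have hcond : (((l.length % 2 : Nat) : Int) == 1) = false := by
      simp; omega
    rw [hcond, if_neg (by simp)]
    congr 1
    apply List.map_congr_left
    intro j hj
    simp only [List.mem_range] at hj
    exact rowsA_elem l j (by omega)

-- ===== VERDICT (by name: the statement is the Claim_ definition above) =====
theorem get_reply_keyboard_spec : Claim_equal_get_reply_keyboard := by
  intro l _ _
  unfold Spec_get_reply_keyboard
  exact get_reply_keyboard_eq l
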